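-- pv_equiv track=rewrite | github.com/simonherlin/pokemon_first | tools/generate_missing_maps.py | tile_grid_outdoor
-- ===== SOURCE A (Python) =====
-- def tile_grid_outdoor(w, h, grass_rects=None, water_rects=None, path_cols=None):
--     """Grille extérieure avec herbes, eau et chemin."""
--     grid = []
--     for y in range(h):
--         for x in range(w):
--             if x == 0 or x == w-1 or y == 0 or y == h-1:
--                 grid.append(3)  # arbres bordure
--             else:
--                 grid.append(0)  # sol normal
--     if grass_rects:
--         for (rx1, ry1, rx2, ry2) in grass_rects:
--             for y in range(ry1, ry2+1):
--                 for x in range(rx1, rx2+1):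
--                     if 0 <= y < h and 0 <= x < w:
--                         grid[y * w + x] = 1
--     if water_rects:
--         for (rx1, ry1, rx2, ry2) in water_rects:
--             for y in range(ry1, ry2+1):
--                 for x in range(rx1, rx2+1):
--                     if 0 <= y < h and 0 <= x < w:
--                         grid[y * w + x] = 4
--     if path_cols:
--         for (col, y1, y2) in path_cols:
--             for y in range(y1, y2+1):
--                 if 0 <= y < h and 0 <= col < w:
--                     grid[y * w + col] = 2
--     return grid
-- ===== SOURCE B (Python) =====
-- def tile_grid_outdoor(w, h, grass_rects=None, water_rects=None, path_cols=None):
--     """Grille exterieure: resolution cellule par cellule, priorite chemin > eau > herbe > bordure.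
--     Les recouvrements actifs sont prefiltres par ligne."""
--     paths = path_cols or []
--     waters = water_rects or []
--     grasses = grass_rects or []
--     grid = []
--     for y in range(h):
--         pa = {c for (c, y1, y2) in paths if y1 <= y <= y2}
--         wa = [(rx1, rx2) for (rx1, ry1, rx2, ry2) in waters if ry1 <= y <= ry2]
--         ga = [(rx1, rx2) for (rx1, ry1, rx2, ry2) in grasses if ry1 <= y <= ry2]
--         for x in range(w):
--             if x in pa:
--                 grid.append(2)
--             elif any(a <= x <= b for (a, b) in wa):
--                 grid.append(4)
--             elif any(a <= x <= b for (a, b) in ga):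
--                 grid.append(1)
--             elif x == 0 or x == w - 1 or y == 0 or y == h - 1:
--                 grid.append(3)
--             else:
--                 grid.append(0)
--     return grid
-- ===== Notes on version B (the rewrite author's own statement) =====
-- stated objective: alternative
-- what changed: Replaces A's base fill plus three in-place overwrite passes over a mutable flat list with a cell-centric pass: per row it prefilters the overlays active in that row (path columns into a set) and resolves each cell by checking them in reverse-priority order (path, water, grass, border, floor), never mutating the grid.
import Mathlib
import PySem

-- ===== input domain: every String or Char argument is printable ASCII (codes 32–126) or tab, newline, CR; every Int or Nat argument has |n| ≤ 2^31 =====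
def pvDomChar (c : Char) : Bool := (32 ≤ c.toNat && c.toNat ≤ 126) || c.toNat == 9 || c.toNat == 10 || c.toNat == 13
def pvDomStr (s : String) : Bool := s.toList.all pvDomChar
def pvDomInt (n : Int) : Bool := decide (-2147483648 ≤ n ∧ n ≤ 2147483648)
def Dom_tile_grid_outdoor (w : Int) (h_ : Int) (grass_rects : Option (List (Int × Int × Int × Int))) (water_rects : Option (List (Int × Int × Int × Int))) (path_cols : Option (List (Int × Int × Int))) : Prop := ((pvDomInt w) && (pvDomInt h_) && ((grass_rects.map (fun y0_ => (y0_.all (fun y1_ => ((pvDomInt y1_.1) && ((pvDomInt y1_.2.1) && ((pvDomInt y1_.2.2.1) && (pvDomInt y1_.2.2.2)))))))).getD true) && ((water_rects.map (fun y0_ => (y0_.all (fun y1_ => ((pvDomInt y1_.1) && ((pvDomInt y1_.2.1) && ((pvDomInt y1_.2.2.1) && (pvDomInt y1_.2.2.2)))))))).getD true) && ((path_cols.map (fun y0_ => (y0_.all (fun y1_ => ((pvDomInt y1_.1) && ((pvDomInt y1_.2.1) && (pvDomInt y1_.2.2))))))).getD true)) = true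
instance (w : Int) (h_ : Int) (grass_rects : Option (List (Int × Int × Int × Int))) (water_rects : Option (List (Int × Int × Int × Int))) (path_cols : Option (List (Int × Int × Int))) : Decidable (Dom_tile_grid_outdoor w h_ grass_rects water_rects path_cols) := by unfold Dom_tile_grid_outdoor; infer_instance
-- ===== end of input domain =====

-- B resolves each cell in one pass, checking overlays in reverse-priority order, instead of A's
-- base fill plus three in-place overwrite passes (same result; objective: alternative decomposition).


-- ===== PORT A =====
-- one (rx1, ry1, rx2, ry2) rectangle pass writing v
def tgoFillRect (w h_ v : Int) (g : List Int) (r : Int × Int × Int × Int) : List Int :=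
  (PySem.List.pyRange r.2.1 (r.2.2.2 + 1) 1).foldl (fun g y =>
    (PySem.List.pyRange r.1 (r.2.2.1 + 1) 1).foldl (fun g x =>
      if 0 ≤ y ∧ y < h_ ∧ 0 ≤ x ∧ x < w then PySem.List.pySetD g (y * w + x) v else g) g) g

-- one (col, y1, y2) path-column pass writing 2
def tgoFillCol (w h_ : Int) (g : List Int) (p : Int × Int × Int) : List Int :=
  (PySem.List.pyRange p.2.1 (p.2.2 + 1) 1).foldl (fun g y =>
    if 0 ≤ y ∧ y < h_ ∧ 0 ≤ p.1 ∧ p.1 < w then PySem.List.pySetD g (y * w + p.1) 2 else g) g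

-- the base grid: border trees, floor inside
def tgoBase (w h_ : Int) : List Int :=
  (PySem.List.pyRange 0 h_ 1).foldl (fun g y =>
    (PySem.List.pyRange 0 w 1).foldl (fun g x =>
      g ++ [if x = 0 ∨ x = w - 1 ∨ y = 0 ∨ y = h_ - 1 then (3 : Int) else 0]) g) []

-- one 'if rects: for r in rects: ...' pass of A
def tgoPassRects (w h_ v : Int) (o : Option (List (Int × Int × Int × Int))) (grid : List Int) : List Int :=
  match o with
  | some l => if l.isEmpty then grid else l.foldl (tgoFillRect w h_ v) grid
  | none => grid

-- the 'if path_cols: ...' pass of A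
def tgoPassCols (w h_ : Int) (o : Option (List (Int × Int × Int))) (grid : List Int) : List Int :=
  match o with
  | some l => if l.isEmpty then grid else l.foldl (tgoFillCol w h_) grid
  | none => grid

def tile_grid_outdoor (w : Int) (h_ : Int) (grass_rects : Option (List (Int × Int × Int × Int))) (water_rects : Option (List (Int × Int × Int × Int))) (path_cols : Option (List (Int × Int × Int))) : List Int :=
  let grid := tgoBase w h_
  let grid := tgoPassRects w h_ 1 grass_rects grid
  let grid := tgoPassRects w h_ 4 water_rects grid
  tgoPassCols w h_ path_cols grid

-- ===== PORT B =====
-- B's per-cell resolution for one row, reverse-priority order; pa/wa/ga are the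
-- overlays prefiltered to those active in row y
def tgoRowCell (w h_ : Int) (pa : PySem.Set Int) (wa ga : List (Int × Int)) (y x : Int) : Int :=
  if PySem.Set.contains pa x then 2
  else if wa.any (fun q => decide (q.1 ≤ x) && decide (x ≤ q.2)) then 4
  else if ga.any (fun q => decide (q.1 ≤ x) && decide (x ≤ q.2)) then 1
  else if x == 0 || x == w - 1 || y == 0 || y == h_ - 1 then 3
  else 0

def tile_grid_outdoor_alt (w : Int) (h_ : Int) (grass_rects : Option (List (Int × Int × Int × Int))) (water_rects : Option (List (Int × Int × Int × Int))) (path_cols : Option (List (Int × Int × Int))) : List Int :=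
  let paths := path_cols.getD []
  let waters := water_rects.getD []
  let grasses := grass_rects.getD []
  (PySem.List.pyRange 0 h_ 1).foldl (fun grid y =>
    let pa := PySem.Set.ofList
      ((paths.filter (fun p => decide (p.2.1 ≤ y) && decide (y ≤ p.2.2))).map (fun p => p.1))
    let wa := (waters.filter (fun r => decide (r.2.1 ≤ y) && decide (y ≤ r.2.2.2))).map
      (fun r => (r.1, r.2.2.1))
    let ga := (grasses.filter (fun r => decide (r.2.1 ≤ y) && decide (y ≤ r.2.2.2))).map
      (fun r => (r.1, r.2.2.1))
    (PySem.List.pyRange 0 w 1).foldl (fun grid x =>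
      grid ++ [tgoRowCell w h_ pa wa ga y x]) grid) []

-- ===== PRECONDITION & SPEC =====
def Spec_tile_grid_outdoor (w : Int) (h_ : Int) (grass_rects : Option (List (Int × Int × Int × Int))) (water_rects : Option (List (Int × Int × Int × Int))) (path_cols : Option (List (Int × Int × Int))) (out : List Int) : Prop := out = tile_grid_outdoor_alt w h_ grass_rects water_rects path_cols
instance (w : Int) (h_ : Int) (grass_rects : Option (List (Int × Int × Int × Int))) (water_rects : Option (List (Int × Int × Int × Int))) (path_cols : Option (List (Int × Int × Int))) (out : List Int) : Decidable (Spec_tile_grid_outdoor w h_ grass_rects water_rects path_cols out) := by unfold Spec_tile_grid_outdoor; infer_instance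

-- ===== CLAIM (what is proved, stated in full; the proofs are below) =====
def Claim_equal_tile_grid_outdoor : Prop := ∀ (w : Int) (h_ : Int) (grass_rects : Option (List (Int × Int × Int × Int))) (water_rects : Option (List (Int × Int × Int × Int))) (path_cols : Option (List (Int × Int × Int))), Dom_tile_grid_outdoor w h_ grass_rects water_rects path_cols → Spec_tile_grid_outdoor w h_ grass_rects water_rects path_cols (tile_grid_outdoor w h_ grass_rects water_rects path_cols)

-- ===== LEMMAS AND PROOFS =====

-- proof-side: does rectangle r cover cell (x, y)?
def tgoCoverRect (x y : Int) (r : Int × Int × Int × Int) : Bool :=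
  decide (r.1 ≤ x) && decide (x ≤ r.2.2.1) && decide (r.2.1 ≤ y) && decide (y ≤ r.2.2.2)

-- proof-side: does path column p cover cell (x, y)?
def tgoCoverCol (x y : Int) (p : Int × Int × Int) : Bool :=
  p.1 == x && decide (p.2.1 ≤ y) && decide (y ≤ p.2.2)

-- abstract grid built from a per-cell function (proof-side only)
def mkGrid (w h_ : Int) (f : Int → Int → Int) : List Int :=
  (PySem.List.pyRange 0 h_ 1).flatMap (fun y => (PySem.List.pyRange 0 w 1).map (fun x => f x y))

-- Nat-indexed form of mkGrid, convenient for row-peeling inductions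
def mkGridN (W H : Nat) (f : Int → Int → Int) : List Int :=
  (List.range H).flatMap (fun (y : Nat) => (List.range W).map (fun (x : Nat) => f x y))

theorem mkGridN_succ (W H : Nat) (f : Int → Int → Int) :
    mkGridN W (H + 1) f = mkGridN W H f ++ (List.range W).map (fun (x : Nat) => f x (H : Int)) := by
  unfold mkGridN
  rw [List.range_succ, List.flatMap_append]
  simp

theorem length_mkGridN (W H : Nat) (f : Int → Int → Int) :
    (mkGridN W H f).length = H * W := by
  induction H with
  | zero => simp [mkGridN]
  | succ H ih =>
    rw [mkGridN_succ, List.length_append, ih, List.length_map, List.length_range]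
    ring

theorem mkGrid_eq_mkGridN (w h_ : Int) (f : Int → Int → Int) :
    mkGrid w h_ f = mkGridN w.toNat h_.toNat f := by
  unfold mkGrid mkGridN
  rw [PySem.List.pyRange_one 0 h_, PySem.List.pyRange_one 0 w]
  rw [List.flatMap_map]
  simp [Function.comp_def, List.map_map]

theorem mkGridN_congr {W H : Nat} {f g : Int → Int → Int}
    (h : ∀ (x y : Nat), x < W → y < H → f (x : Int) (y : Int) = g (x : Int) (y : Int)) :
    mkGridN W H f = mkGridN W H g := by
  unfold mkGridN
  apply List.flatMap_congr
  intro y hy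
  apply List.map_congr_left
  intro x hx
  exact h x y (List.mem_range.mp hx) (List.mem_range.mp hy)

theorem mkGrid_congr {w h_ : Int} {f g : Int → Int → Int}
    (h : ∀ x y, 0 ≤ x → x < w → 0 ≤ y → y < h_ → f x y = g x y) :
    mkGrid w h_ f = mkGrid w h_ g := by
  rw [mkGrid_eq_mkGridN, mkGrid_eq_mkGridN]
  apply mkGridN_congr
  intro x y hx hy
  exact h _ _ (by omega) (by omega) (by omega) (by omega)

theorem set_mkGridN (W H x y : Nat) (f : Int → Int → Int) (v : Int) (hx : x < W) :
    y < H →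
    (mkGridN W H f).set (y * W + x) v
      = mkGridN W H (fun a b => if a = (x : Int) ∧ b = (y : Int) then v else f a b) := by
  induction H with
  | zero => omega
  | succ H ih =>
    intro hy
    rw [mkGridN_succ, mkGridN_succ]
    by_cases hyH : y < H
    · rw [List.set_append_left _ _ (by
        rw [length_mkGridN]
        calc y * W + x < y * W + W := by omega
          _ ≤ H * W := by nlinarith)]
      rw [ih hyH]
      congr 1
      apply List.map_congr_left
      intro a _
      rw [if_neg (by
        rintro ⟨-, hb⟩
        have : (H : Int) = (y : Int) := hb
        omega)]
    · have hyH' : y = H := by omega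
      subst hyH'
      rw [List.set_append_right _ _ (by rw [length_mkGridN]; omega)]
      congr 1
      · apply mkGridN_congr
        intro a b _ hb
        rw [if_neg (by
          rintro ⟨-, hb'⟩
          have : (b : Int) = (y : Int) := hb'
          omega)]
      · rw [length_mkGridN]
        have hx' : y * W + x - y * W = x := by omega
        rw [hx']
        apply List.ext_getElem (by simp)
        intro i h1 h2
        have hiW : i < W := by simpa using h2
        rw [List.getElem_set]
        rw [List.getElem_map, List.getElem_range]
        rw [List.getElem_map, List.getElem_range]
        by_cases hix : x = i
        · subst hix
          rw [if_pos rfl, if_pos ⟨rfl, rfl⟩]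
        · rw [if_neg hix, if_neg (by
            rintro ⟨ha, -⟩
            exact hix (by exact_mod_cast ha.symm))]

theorem set_mkGrid {w h_ x y : Int} (f : Int → Int → Int) (v : Int)
    (hx : 0 ≤ x) (hxw : x < w) (hy : 0 ≤ y) (hyh : y < h_) :
    PySem.List.pySetD (mkGrid w h_ f) (y * w + x) v
      = mkGrid w h_ (fun a b => if a = x ∧ b = y then v else f a b) := by
  have hw : 0 ≤ w := by omega
  have hidx : 0 ≤ y * w + x := by positivity
  rw [PySem.List.pySetD_of_nonneg _ _ hidx]
  have hcast : ((y.toNat * w.toNat + x.toNat : Nat) : Int) = y * w + x := by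
    push_cast
    rw [Int.toNat_of_nonneg hy, Int.toNat_of_nonneg hw, Int.toNat_of_nonneg hx]
  have h1 : (y * w + x).toNat = y.toNat * w.toNat + x.toNat := by omega
  rw [h1, mkGrid_eq_mkGridN, mkGrid_eq_mkGridN]
  rw [set_mkGridN _ _ _ _ _ _ (by omega) (by omega)]
  apply mkGridN_congr
  intro a b _ _
  rw [Int.toNat_of_nonneg hx, Int.toNat_of_nonneg hy]

-- one row of a rectangle-fill pass
theorem fillRowAux (w h_ v y : Int) (n : Nat) :
    ∀ (a b : Int), (b - a).toNat = n → ∀ f : Int → Int → Int,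
    (PySem.List.pyRange a b 1).foldl (fun g x =>
        if 0 ≤ y ∧ y < h_ ∧ 0 ≤ x ∧ x < w then PySem.List.pySetD g (y * w + x) v else g)
      (mkGrid w h_ f)
      = mkGrid w h_ (fun x' y' => if (a ≤ x' ∧ x' < b) ∧ y' = y then v else f x' y') := by
  induction n with
  | zero =>
    intro a b hab f
    rw [PySem.List.pyRange_one_eq_nil (show b ≤ a by omega)]
    apply mkGrid_congr
    intro x' y' _ _ _ _
    rw [if_neg (by omega)]
  | succ n ih =>
    intro a b hab f
    rw [PySem.List.pyRange_one_cons (show a < b by omega)]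
    simp only [List.foldl_cons]
    by_cases hg : 0 ≤ y ∧ y < h_ ∧ 0 ≤ a ∧ a < w
    · rw [if_pos hg, set_mkGrid f v hg.2.2.1 hg.2.2.2 hg.1 hg.2.1, ih (a + 1) b (by omega)]
      apply mkGrid_congr
      intro x' y' _ _ _ _
      split_ifs <;> first | rfl | omega
    · rw [if_neg hg, ih (a + 1) b (by omega)]
      apply mkGrid_congr
      intro x' y' hx0 hxw hy0 hyh
      split_ifs <;> first | rfl | omega

-- one rectangle-fill pass over its y-range
theorem fillRectAux (w h_ v a b : Int) (n : Nat) :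
    ∀ (c d : Int), (d - c).toNat = n → ∀ f : Int → Int → Int,
    (PySem.List.pyRange c d 1).foldl (fun g y =>
        (PySem.List.pyRange a b 1).foldl (fun g x =>
          if 0 ≤ y ∧ y < h_ ∧ 0 ≤ x ∧ x < w then PySem.List.pySetD g (y * w + x) v else g) g)
      (mkGrid w h_ f)
      = mkGrid w h_ (fun x' y' => if (a ≤ x' ∧ x' < b) ∧ (c ≤ y' ∧ y' < d) then v else f x' y') := by
  induction n with
  | zero =>
    intro c d hcd f
    rw [PySem.List.pyRange_one_eq_nil (show d ≤ c by omega)]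
    apply mkGrid_congr
    intro x' y' _ _ _ _
    rw [if_neg (by omega)]
  | succ n ih =>
    intro c d hcd f
    rw [PySem.List.pyRange_one_cons (show c < d by omega)]
    simp only [List.foldl_cons]
    rw [fillRowAux w h_ v c ((b - a).toNat) a b rfl f, ih (c + 1) d (by omega)]
    apply mkGrid_congr
    intro x' y' _ _ _ _
    split_ifs <;> first | rfl | omega

-- one rectangle written as a cell-cover update
theorem tgoFillRect_eq (w h_ v : Int) (r : Int × Int × Int × Int) (f : Int → Int → Int) :
    tgoFillRect w h_ v (mkGrid w h_ f) r
      = mkGrid w h_ (fun x' y' => if tgoCoverRect x' y' r then v else f x' y') := by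
  unfold tgoFillRect
  rw [fillRectAux w h_ v r.1 (r.2.2.1 + 1) ((r.2.2.2 + 1 - r.2.1).toNat) r.2.1 (r.2.2.2 + 1) rfl f]
  apply mkGrid_congr
  intro x' y' _ _ _ _
  simp only [tgoCoverRect, Bool.and_eq_true, decide_eq_true_eq]
  split_ifs <;> first | rfl | omega

-- a whole list of grass/water rectangles
theorem fillRects_eq (w h_ v : Int) (l : List (Int × Int × Int × Int)) :
    ∀ f : Int → Int → Int,
    l.foldl (tgoFillRect w h_ v) (mkGrid w h_ f)
      = mkGrid w h_ (fun x' y' => if l.any (tgoCoverRect x' y') then v else f x' y') := by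
  induction l with
  | nil =>
    intro f
    apply mkGrid_congr
    intro x' y' _ _ _ _
    simp
  | cons r l ih =>
    intro f
    simp only [List.foldl_cons]
    rw [tgoFillRect_eq, ih]
    apply mkGrid_congr
    intro x' y' _ _ _ _
    simp only [List.any_cons, Bool.or_eq_true]
    split_ifs <;> first | rfl | tauto

-- one path-column pass over its y-range
theorem fillColAux (w h_ col : Int) (n : Nat) :
    ∀ (c d : Int), (d - c).toNat = n → ∀ f : Int → Int → Int,
    (PySem.List.pyRange c d 1).foldl (fun g y =>
        if 0 ≤ y ∧ y < h_ ∧ 0 ≤ col ∧ col < w then PySem.List.pySetD g (y * w + col) 2 else g)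
      (mkGrid w h_ f)
      = mkGrid w h_ (fun x' y' => if x' = col ∧ (c ≤ y' ∧ y' < d) then 2 else f x' y') := by
  induction n with
  | zero =>
    intro c d hcd f
    rw [PySem.List.pyRange_one_eq_nil (show d ≤ c by omega)]
    apply mkGrid_congr
    intro x' y' _ _ _ _
    rw [if_neg (by omega)]
  | succ n ih =>
    intro c d hcd f
    rw [PySem.List.pyRange_one_cons (show c < d by omega)]
    simp only [List.foldl_cons]
    by_cases hg : 0 ≤ c ∧ c < h_ ∧ 0 ≤ col ∧ col < w
    · rw [if_pos hg, set_mkGrid f 2 hg.2.2.1 hg.2.2.2 hg.1 hg.2.1, ih (c + 1) d (by omega)]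
      apply mkGrid_congr
      intro x' y' _ _ _ _
      split_ifs <;> first | rfl | omega
    · rw [if_neg hg, ih (c + 1) d (by omega)]
      apply mkGrid_congr
      intro x' y' hx0 hxw hy0 hyh
      split_ifs <;> first | rfl | omega

-- one path column written as a cell-cover update
theorem tgoFillCol_eq (w h_ : Int) (p : Int × Int × Int) (f : Int → Int → Int) :
    tgoFillCol w h_ (mkGrid w h_ f) p
      = mkGrid w h_ (fun x' y' => if tgoCoverCol x' y' p then 2 else f x' y') := by
  unfold tgoFillCol
  rw [fillColAux w h_ p.1 ((p.2.2 + 1 - p.2.1).toNat) p.2.1 (p.2.2 + 1) rfl f]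
  apply mkGrid_congr
  intro x' y' _ _ _ _
  simp only [tgoCoverCol, Bool.and_eq_true, decide_eq_true_eq, beq_iff_eq]
  split_ifs <;> first | rfl | omega

-- a whole list of path columns
theorem fillCols_eq (w h_ : Int) (l : List (Int × Int × Int)) :
    ∀ f : Int → Int → Int,
    l.foldl (tgoFillCol w h_) (mkGrid w h_ f)
      = mkGrid w h_ (fun x' y' => if l.any (tgoCoverCol x' y') then 2 else f x' y') := by
  induction l with
  | nil =>
    intro f
    apply mkGrid_congr
    intro x' y' _ _ _ _
    simp
  | cons p l ih =>
    intro f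
    simp only [List.foldl_cons]
    rw [tgoFillCol_eq, ih]
    apply mkGrid_congr
    intro x' y' _ _ _ _
    simp only [List.any_cons, Bool.or_eq_true]
    split_ifs <;> first | rfl | tauto

-- the base pass builds mkGrid of the border function
theorem base_eq (w h_ : Int) :
    tgoBase w h_
      = mkGrid w h_ (fun x y => if x = 0 ∨ x = w - 1 ∨ y = 0 ∨ y = h_ - 1 then 3 else 0) := by
  unfold tgoBase mkGrid
  rw [List.foldl_ext _ (fun g y =>
      g ++ (PySem.List.pyRange 0 w 1).map
        (fun x => if x = 0 ∨ x = w - 1 ∨ y = 0 ∨ y = h_ - 1 then (3 : Int) else 0)) []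
    (by
      intro g y _
      exact PySem.List.foldl_append_singleton_eq_map _ _ _)]
  rw [PySem.List.foldl_append_eq_flatMap]
  simp

-- the truthiness test in A collapses to folding over getD []
theorem pass_rects (w h_ v : Int) (o : Option (List (Int × Int × Int × Int))) (grid : List Int) :
    tgoPassRects w h_ v o grid = (o.getD []).foldl (tgoFillRect w h_ v) grid := by
  cases o with
  | none => rfl
  | some l => cases l <;> simp [tgoPassRects]

theorem pass_cols (w h_ : Int) (o : Option (List (Int × Int × Int))) (grid : List Int) :
    tgoPassCols w h_ o grid = (o.getD []).foldl (tgoFillCol w h_) grid := by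
  cases o with
  | none => rfl
  | some l => cases l <;> simp [tgoPassCols]

-- per-row prefiltering in B tests the same cover conditions as A's overlay lists
theorem rowSet_eq (ps : List (Int × Int × Int)) (x y : Int) :
    PySem.Set.contains (PySem.Set.ofList
        ((ps.filter (fun p => decide (p.2.1 ≤ y) && decide (y ≤ p.2.2))).map (fun p => p.1))) x
      = ps.any (tgoCoverCol x y) := by
  rw [Bool.eq_iff_iff]
  simp only [PySem.Set.contains_iff, PySem.Set.mem_ofList, List.mem_map, List.mem_filter,
    List.any_eq_true, tgoCoverCol, Bool.and_eq_true, decide_eq_true_eq, beq_iff_eq]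
  aesop

theorem rowRects_eq (ws : List (Int × Int × Int × Int)) (x y : Int) :
    ((ws.filter (fun r => decide (r.2.1 ≤ y) && decide (y ≤ r.2.2.2))).map
        (fun r => (r.1, r.2.2.1))).any (fun q => decide (q.1 ≤ x) && decide (x ≤ q.2))
      = ws.any (tgoCoverRect x y) := by
  rw [Bool.eq_iff_iff]
  simp only [List.any_eq_true, List.mem_map, List.mem_filter, tgoCoverRect,
    Bool.and_eq_true, decide_eq_true_eq]
  aesop

-- B builds mkGrid of its per-cell function
theorem alt_eq (w h_ : Int) (gr wa : Option (List (Int × Int × Int × Int)))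
    (pa : Option (List (Int × Int × Int))) :
    tile_grid_outdoor_alt w h_ gr wa pa
      = mkGrid w h_ (fun x y => tgoRowCell w h_
          (PySem.Set.ofList
            (((pa.getD []).filter (fun p => decide (p.2.1 ≤ y) && decide (y ≤ p.2.2))).map (fun p => p.1)))
          (((wa.getD []).filter (fun r => decide (r.2.1 ≤ y) && decide (y ≤ r.2.2.2))).map
            (fun r => (r.1, r.2.2.1)))
          (((gr.getD []).filter (fun r => decide (r.2.1 ≤ y) && decide (y ≤ r.2.2.2))).map
            (fun r => (r.1, r.2.2.1))) y x) := by
  unfold tile_grid_outdoor_alt mkGrid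
  rw [List.foldl_ext _ (fun grid y =>
      grid ++ (PySem.List.pyRange 0 w 1).map (fun x => tgoRowCell w h_
        (PySem.Set.ofList
          (((pa.getD []).filter (fun p => decide (p.2.1 ≤ y) && decide (y ≤ p.2.2))).map (fun p => p.1)))
        (((wa.getD []).filter (fun r => decide (r.2.1 ≤ y) && decide (y ≤ r.2.2.2))).map
          (fun r => (r.1, r.2.2.1)))
        (((gr.getD []).filter (fun r => decide (r.2.1 ≤ y) && decide (y ≤ r.2.2.2))).map
          (fun r => (r.1, r.2.2.1))) y x)) []
    (by
      intro g y _
      exact PySem.List.foldl_append_singleton_eq_map _ _ _)]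
  rw [PySem.List.foldl_append_eq_flatMap]
  simp

-- ===== VERDICT (by name: the statement is the Claim_ definition above) =====
theorem tile_grid_outdoor_spec : Claim_equal_tile_grid_outdoor := by
  intro w h_ gr wa pa _
  unfold Spec_tile_grid_outdoor
  show tgoPassCols w h_ pa (tgoPassRects w h_ 4 wa (tgoPassRects w h_ 1 gr (tgoBase w h_)))
    = tile_grid_outdoor_alt w h_ gr wa pa
  rw [pass_rects, pass_rects, pass_cols, base_eq, fillRects_eq, fillRects_eq, fillCols_eq, alt_eq]
  apply mkGrid_congr
  intro x y _ _ _ _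
  simp only [tgoRowCell, rowSet_eq, rowRects_eq, Bool.or_eq_true, beq_iff_eq]
  split_ifs <;> first | rfl | tauto
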